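-- pv_equiv track=rewrite | github.com/d13g000/MMB5009 | annotate_to_fasta.py | build_annotated_sequence
-- ===== SOURCE A (Python) =====
-- def build_annotated_sequence(
--     full_seq: str,
--     pep_start: int,
--     pep_end: int,
--     mods_dict: dict
-- ) -> str:
--     """
--     full_seq: entire protein sequence (1-based indexing).
--     pep_start, pep_end:  1-based start/end of peptide (e.g. 155, 166).
--     mods_dict: { position (int) : (tag, count) } e.g. {165: ("Me2",1),
--     108:("Me2",2) }.
--
--     Output rules:
--       - Residues outside pep_start..pep_end → lowercase
--       - Residues inside pep_start..pep_end → UPPERCASE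
--       - If i in mods_dict AND (pep_start ≤ i ≤ pep_end), append "<{tag}:{
--       count}>"
--         immediately after the uppercase letter. Mods outside the peptide
--         window are ignored.
--     """
--     annotated = []
--     for i, aa in enumerate(full_seq, start=1):
--         in_pep = (pep_start <= i <= pep_end)
--         base = aa.upper() if in_pep else aa.lower()
--
--         if in_pep and (i in mods_dict):
--             tag, count = mods_dict[i]
--             annotated.append(f"{base}<{tag}:{count}>")
--         else:
--             annotated.append(base)
--
--     return "".join(annotated)
-- ===== SOURCE B (Python) =====
-- def build_annotated_sequence(
--     full_seq: str,
--     pep_start: int,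
--     pep_end: int,
--     mods_dict: dict
-- ) -> str:
--     # Three-region decomposition: lowercase prefix, annotated uppercase
--     # peptide window, lowercase suffix.
--     if pep_end < pep_start:
--         return full_seq.lower()
--     n = len(full_seq)
--     out = full_seq[:max(0, pep_start - 1)].lower()
--     for i in range(max(1, pep_start), min(n, pep_end) + 1):
--         out += full_seq[i - 1].upper()
--         pair = mods_dict.get(i)
--         if pair is not None:
--             tag, count = pair
--             out += f"<{tag}:{count}>"
--     return out + full_seq[max(0, pep_end):].lower()
-- ===== Notes on version B (the rewrite author's own statement) =====
-- stated objective: alternative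
-- what changed: Replaces the single per-character branch-on-position loop by a three-region decomposition: a lowercased prefix slice, a loop only over the clamped peptide window (the only region that consults mods_dict), and a lowercased suffix slice.
import Mathlib
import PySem

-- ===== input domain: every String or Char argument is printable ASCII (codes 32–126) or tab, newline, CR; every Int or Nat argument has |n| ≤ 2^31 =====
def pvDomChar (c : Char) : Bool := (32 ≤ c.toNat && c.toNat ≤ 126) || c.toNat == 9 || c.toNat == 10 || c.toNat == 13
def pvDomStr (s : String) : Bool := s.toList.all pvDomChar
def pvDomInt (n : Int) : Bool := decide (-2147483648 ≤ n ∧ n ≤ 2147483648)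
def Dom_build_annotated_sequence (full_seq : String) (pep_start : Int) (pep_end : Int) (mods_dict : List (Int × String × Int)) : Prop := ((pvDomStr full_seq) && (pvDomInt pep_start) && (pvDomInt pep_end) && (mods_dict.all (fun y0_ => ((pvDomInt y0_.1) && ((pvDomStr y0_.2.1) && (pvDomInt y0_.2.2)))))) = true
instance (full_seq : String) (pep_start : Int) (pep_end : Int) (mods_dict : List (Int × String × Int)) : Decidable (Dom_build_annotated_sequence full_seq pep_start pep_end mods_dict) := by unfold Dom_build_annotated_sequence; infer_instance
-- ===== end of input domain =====

-- B replaces A's per-character position test by a three-region decomposition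
-- (lowercase prefix slice, annotated window loop, lowercase suffix slice); equal return values, no speed claim.

-- ===== PORT A =====
-- the "<tag:count>" suffix of f"{base}<{tag}:{count}>"
def pvTagChars (tag : String) (count : Int) : List Char :=
  '<' :: tag.toList ++ ':' :: PySem.Int.toChars count ++ ['>']

def build_annotated_sequence (full_seq : String) (pep_start : Int) (pep_end : Int) (mods_dict : List (Int × String × Int)) : String :=
  let d := PySem.Dict.mk mods_dict
  let annotated : List (List Char) :=
    (PySem.List.enumerate full_seq.toList 1).foldl
      (fun acc p =>
        let i := p.1
        let aa := p.2
        let in_pep : Bool := decide (pep_start ≤ i ∧ i ≤ pep_end)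
        let base : List Char := if in_pep then [PySem.Chars.upperChar aa] else [PySem.Chars.lowerChar aa]
        if in_pep && d.contains i then
          match d.get? i with
          | some (tag, count) => acc ++ [base ++ pvTagChars tag count]
          | none => acc ++ [base]   -- unreachable: d.contains i = true
        else
          acc ++ [base])
      []
  String.ofList annotated.flatten   -- "".join(annotated)

-- ===== PORT B =====
def build_annotated_sequence_alt (full_seq : String) (pep_start : Int) (pep_end : Int) (mods_dict : List (Int × String × Int)) : String :=
  if pep_end < pep_start then
    String.ofList (PySem.Chars.lower full_seq.toList)
  else
    let s := full_seq.toList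
    let n : Int := s.length
    let d := PySem.Dict.mk mods_dict
    let out0 := PySem.Chars.lower (PySem.List.slice s none (some (max 0 (pep_start - 1))))
    let out :=
      (PySem.List.pyRange (max 1 pep_start) (min n pep_end + 1) 1).foldl
        (fun acc i =>
          let up : List Char := [PySem.Chars.upperChar (PySem.List.pyGetD s (i - 1) ' ')]
          match d.get? i with
          | some (tag, count) => acc ++ up ++ pvTagChars tag count
          | none => acc ++ up)
        out0
    String.ofList (out ++ PySem.Chars.lower (PySem.List.slice s (some (max 0 pep_end)) none))

-- ===== PRECONDITION & SPEC =====
def Spec_build_annotated_sequence (full_seq : String) (pep_start : Int) (pep_end : Int) (mods_dict : List (Int × String × Int)) (out : String) : Prop := out = build_annotated_sequence_alt full_seq pep_start pep_end mods_dict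
instance (full_seq : String) (pep_start : Int) (pep_end : Int) (mods_dict : List (Int × String × Int)) (out : String) : Decidable (Spec_build_annotated_sequence full_seq pep_start pep_end mods_dict out) := by unfold Spec_build_annotated_sequence; infer_instance

-- ===== CLAIM (what is proved, stated in full; the proofs are below) =====
def Claim_equal_build_annotated_sequence : Prop := ∀ (full_seq : String) (pep_start : Int) (pep_end : Int) (mods_dict : List (Int × String × Int)), Dom_build_annotated_sequence full_seq pep_start pep_end mods_dict → Spec_build_annotated_sequence full_seq pep_start pep_end mods_dict (build_annotated_sequence full_seq pep_start pep_end mods_dict)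

-- ===== LEMMAS AND PROOFS =====

-- helpers used only by the proofs
-- the "<tag:count>" part appended when position i carries a modification (empty when it does not)
def pvTagOf (d : PySem.Dict Int (String × Int)) (i : Int) : List Char :=
  match d.get? i with
  | some (tag, count) => pvTagChars tag count
  | none => []

-- the piece A contributes for one enumerated character
def pvG (ps pe : Int) (d : PySem.Dict Int (String × Int)) (p : Int × Char) : List Char :=
  if ps ≤ p.1 ∧ p.1 ≤ pe then PySem.Chars.upperChar p.2 :: pvTagOf d p.1
  else [PySem.Chars.lowerChar p.2]

-- the piece B contributes for one window position
def pvW (s : List Char) (d : PySem.Dict Int (String × Int)) (i : Int) : List Char :=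
  PySem.Chars.upperChar (PySem.List.pyGetD s (i - 1) ' ') :: pvTagOf d i

theorem pvA_foldl (ps pe : Int) (d : PySem.Dict Int (String × Int))
    (l : List (Int × Char)) (acc : List (List Char)) :
    l.foldl
      (fun acc p =>
        let i := p.1
        let aa := p.2
        let in_pep : Bool := decide (ps ≤ i ∧ i ≤ pe)
        let base : List Char := if in_pep then [PySem.Chars.upperChar aa] else [PySem.Chars.lowerChar aa]
        if in_pep && d.contains i then
          match d.get? i with
          | some (tag, count) => acc ++ [base ++ pvTagChars tag count]
          | none => acc ++ [base]
        else
          acc ++ [base]) acc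
    = acc ++ l.map (pvG ps pe d) := by
  induction l generalizing acc with
  | nil => simp
  | cons p l ih =>
    rw [List.foldl_cons, ih]
    dsimp only
    by_cases h : ps ≤ p.1 ∧ p.1 ≤ pe
    · rw [decide_eq_true h]
      cases hg : d.get? p.1 with
      | none =>
        have hc : d.contains p.1 = false := by
          rw [PySem.Dict.contains_eq_isSome_get?, hg]; rfl
        simp [hc, pvG, h, pvTagOf, hg]
      | some tc =>
        obtain ⟨tag, count⟩ := tc
        have hc : d.contains p.1 = true := by
          rw [PySem.Dict.contains_eq_isSome_get?, hg]; rfl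
        simp [hc, pvG, h, pvTagOf, hg]
    · rw [decide_eq_false h]
      simp [pvG, h]

theorem pvB_foldl (s : List Char) (d : PySem.Dict Int (String × Int))
    (l : List Int) (acc : List Char) :
    l.foldl
      (fun acc i =>
        let up : List Char := [PySem.Chars.upperChar (PySem.List.pyGetD s (i - 1) ' ')]
        match d.get? i with
        | some (tag, count) => acc ++ up ++ pvTagChars tag count
        | none => acc ++ up) acc
    = acc ++ l.flatMap (pvW s d) := by
  induction l generalizing acc with
  | nil => simp
  | cons i l ih =>
    rw [List.foldl_cons, ih]
    dsimp only
    cases hg : d.get? i with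
    | none => simp [pvW, pvTagOf, hg]
    | some tc =>
      obtain ⟨tag, count⟩ := tc
      simp [pvW, pvTagOf, hg]

-- a stretch of characters all OUTSIDE the peptide window contributes its lowercase image
theorem pvLow (ps pe : Int) (d : PySem.Dict Int (String × Int)) :
    ∀ (t : List Char) (k : Int),
      (∀ j : Nat, j < t.length → ¬ (ps ≤ k + (j : Int) ∧ k + (j : Int) ≤ pe)) →
      (PySem.List.enumerate t k).flatMap (pvG ps pe d) = PySem.Chars.lower t := by
  intro t
  induction t with
  | nil => intro k _; simp [PySem.List.enumerate_nil, PySem.Chars.lower]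
  | cons c t ih =>
    intro k h
    rw [PySem.List.enumerate_cons]
    have h0 : ¬ (ps ≤ k ∧ k ≤ pe) := by
      have := h 0 (by simp)
      simpa using this
    have ht : (PySem.List.enumerate t (k + 1)).flatMap (pvG ps pe d) = PySem.Chars.lower t := by
      apply ih
      intro j hj
      have := h (j + 1) (by simpa using Nat.succ_lt_succ hj)
      intro hcon
      apply this
      push_cast
      constructor <;> omega
    simp [pvG, h0, ht, PySem.Chars.lower]

-- the peptide window: B's position loop equals A's contribution on the window slice
theorem pvWin (ps pe : Int) (d : PySem.Dict Int (String × Int)) (s : List Char) :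
    ∀ (m u v : Nat), v - u = m → u ≤ v → v ≤ s.length →
      (∀ i : Nat, u < i → i ≤ v → (ps ≤ (i : Int) ∧ (i : Int) ≤ pe)) →
      (PySem.List.pyRange ((u : Int) + 1) ((v : Int) + 1) 1).flatMap (pvW s d)
        = (PySem.List.enumerate ((s.drop u).take (v - u)) ((u : Int) + 1)).flatMap (pvG ps pe d) := by
  intro m
  induction m with
  | zero =>
    intro u v hm _ _ _
    have huv : u = v := by omega
    subst huv
    rw [PySem.List.pyRange_one_eq_nil (by omega)]
    simp [PySem.List.enumerate_nil]
  | succ m ih =>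
    intro u v hm hle hvlen hpep
    have hulv : u < v := by omega
    have hulen : u < s.length := by omega
    have hdrop : s.drop u = s[u] :: s.drop (u + 1) := List.drop_eq_getElem_cons hulen
    have htake : (s.drop u).take (v - u) = s[u] :: ((s.drop (u + 1)).take (v - (u + 1))) := by
      rw [hdrop]
      have : v - u = (v - (u + 1)) + 1 := by omega
      rw [this, List.take_succ_cons]
    rw [PySem.List.pyRange_one_cons (by omega), htake, PySem.List.enumerate_cons]
    simp only [List.flatMap_cons]
    have hhead : pvW s d ((u : Int) + 1) = pvG ps pe d (((u : Int) + 1), s[u]) := by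
      have hget : PySem.List.pyGetD s ((u : Int) + 1 - 1) ' ' = s[u] := by
        have : (u : Int) + 1 - 1 = ((u : Nat) : Int) := by omega
        rw [this, PySem.List.pyGetD_natCast, List.getD_eq_getElem s ' ' hulen]
      have hin : ps ≤ (u : Int) + 1 ∧ (u : Int) + 1 ≤ pe := by
        have := hpep (u + 1) (by omega) (by omega)
        push_cast at this
        exact this
      rw [pvW, hget, pvG, if_pos hin]
    have htail :
        (PySem.List.pyRange ((u : Int) + 1 + 1) ((v : Int) + 1) 1).flatMap (pvW s d)
          = (PySem.List.enumerate ((s.drop (u + 1)).take (v - (u + 1))) ((u : Int) + 1 + 1)).flatMap (pvG ps pe d) := by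
      have h1 : (u : Int) + 1 + 1 = (((u + 1 : Nat)) : Int) + 1 := by push_cast; ring
      rw [h1]
      exact ih (u + 1) v (by omega) (by omega) hvlen
        (fun i hi1 hi2 => hpep i (by omega) hi2)
    rw [hhead, htail]

-- ===== VERDICT (by name: the statement is the Claim_ definition above) =====
theorem build_annotated_sequence_spec : Claim_equal_build_annotated_sequence := by
  intro full_seq ps pe m _
  unfold Spec_build_annotated_sequence
  unfold build_annotated_sequence build_annotated_sequence_alt
  dsimp only
  rw [pvA_foldl]
  simp only [List.nil_append]
  by_cases hpe : pe < ps
  · rw [if_pos hpe]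
    congr 1
    rw [← List.flatMap_def]
    apply pvLow
    intro j _
    omega
  · rw [if_neg hpe]
    rw [pvB_foldl]
    congr 1
    rw [← List.flatMap_def]
    set s := full_seq.toList with hs
    set n : Nat := s.length with hn
    set p' : Nat := (max 0 (ps - 1)).toNat with hp'
    set q' : Nat := (max 0 pe).toNat with hq'
    set q'' : Nat := min q' n with hq''
    have hpse : ps ≤ pe := by omega
    have hpc : (p' : Int) = max 0 (ps - 1) := Int.toNat_of_nonneg (le_max_left _ _)
    have hqc : (q' : Int) = max 0 pe := Int.toNat_of_nonneg (le_max_left _ _)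
    have hpq : p' ≤ q' := by omega
    rw [PySem.List.slice_to _ (le_max_left 0 (ps - 1)), PySem.List.slice_from _ (le_max_left 0 pe)]
    rw [← hp', ← hq']
    rcases Nat.lt_or_ge p' n with hcase | hcase
    · -- the peptide window starts inside the string
      have hq2n : q'' ≤ n := Nat.min_le_right _ _
      have hpq2 : p' ≤ q'' := by omega
      have hsufeq : s.drop q' = s.drop q'' := by
        by_cases h1 : q' ≤ n
        · have : q'' = q' := by omega
          rw [this]
        · have : q'' = n := by omega
          rw [List.drop_eq_nil_of_le (by omega), this, List.drop_eq_nil_of_le (by omega)]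
      have hdq : (s.drop p').drop (q'' - p') = s.drop q'' := by
        rw [List.drop_drop]
        congr 1
        omega
      have hsplit : s = s.take p' ++ ((s.drop p').take (q'' - p') ++ s.drop q'') := by
        rw [← hdq, List.take_append_drop, List.take_append_drop]
      have hlen1 : (s.take p').length = p' := by
        rw [List.length_take]
        omega
      have hlen2 : ((s.drop p').take (q'' - p')).length = q'' - p' := by
        rw [List.length_take, List.length_drop]
        omega
      have henum : PySem.List.enumerate s 1
          = PySem.List.enumerate (s.take p') 1
            ++ (PySem.List.enumerate ((s.drop p').take (q'' - p')) ((p' : Int) + 1)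
                ++ PySem.List.enumerate (s.drop q'') ((q'' : Int) + 1)) := by
        conv_lhs => rw [hsplit]
        rw [PySem.List.enumerate_append, PySem.List.enumerate_append, hlen1, hlen2]
        have ha : (1 : Int) + (p' : Int) = (p' : Int) + 1 := by omega
        rw [ha]
        have hb : (p' : Int) + 1 + ((q'' - p' : Nat) : Int) = (q'' : Int) + 1 := by omega
        rw [hb]
      rw [henum, List.flatMap_append, List.flatMap_append]
      have e1 : (PySem.List.enumerate (s.take p') 1).flatMap (pvG ps pe ⟨m⟩)
          = PySem.Chars.lower (s.take p') := by
        apply pvLow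
        intro j hj
        rw [hlen1] at hj
        omega
      have e2 : (PySem.List.enumerate ((s.drop p').take (q'' - p')) ((p' : Int) + 1)).flatMap (pvG ps pe ⟨m⟩)
          = (PySem.List.pyRange (max 1 ps) (min (n : Int) pe + 1)).flatMap (pvW s ⟨m⟩) := by
        by_cases h0 : 0 ≤ pe
        · have hrange : PySem.List.pyRange (max 1 ps) (min (n : Int) pe + 1)
              = PySem.List.pyRange ((p' : Int) + 1) ((q'' : Int) + 1) := by
            congr 1 <;> omega
          rw [hrange]
          exact (pvWin ps pe ⟨m⟩ s (q'' - p') p' q'' rfl hpq2 hq2n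
            (fun i hi1 hi2 => by constructor <;> omega)).symm
        · have hz : q'' = 0 := by omega
          have hz' : p' = 0 := by omega
          rw [PySem.List.pyRange_one_eq_nil (by omega), hz, hz']
          simp [PySem.List.enumerate_nil]
      have e3 : (PySem.List.enumerate (s.drop q'') ((q'' : Int) + 1)).flatMap (pvG ps pe ⟨m⟩)
          = PySem.Chars.lower (s.drop q') := by
        rw [hsufeq]
        apply pvLow
        intro j hj
        rw [List.length_drop] at hj
        omega
      rw [e1, e2, e3, List.append_assoc]
    · -- the window starts past the end: everything is lowercased
      have h1 : s.take p' = s := List.take_of_length_le (by omega)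
      have h2 : s.drop q' = [] := List.drop_eq_nil_of_le (by omega)
      have h3 : PySem.List.pyRange (max 1 ps) (min (n : Int) pe + 1) = [] :=
        PySem.List.pyRange_one_eq_nil (by omega)
      rw [h1, h2, h3]
      have h4 : PySem.Chars.lower ([] : List Char) = [] := rfl
      rw [h4]
      simp only [List.flatMap_nil, List.append_nil]
      apply pvLow
      intro j hj
      omega
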